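-- pv_equiv track=rewrite | github.com/paiml/depyler | examples/hard_str_manacher.py | manacher_odd
-- ===== SOURCE A (Python) =====
-- def manacher_odd(s: str) -> list[int]:
--     n: int = len(s)
--     p: list[int] = []
--     i: int = 0
--     while i < n:
--         p.append(0)
--         i = i + 1
--     if n == 0:
--         return p
--     p[0] = 0
--     center: int = 0
--     right: int = 0
--     i = 1
--     while i < n:
--         mirror: int = 2 * center - i
--         if i < right and mirror >= 0:
--             diff: int = right - i
--             if p[mirror] < diff:
--                 p[i] = p[mirror]
--             else:
--                 p[i] = diff
--         lo: int = i - p[i] - 1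
--         hi: int = i + p[i] + 1
--         while lo >= 0 and hi < n and s[lo] == s[hi]:
--             p[i] = p[i] + 1
--             lo = lo - 1
--             hi = hi + 1
--         if i + p[i] > right:
--             center = i
--             right = i + p[i]
--         i = i + 1
--     return p
-- ===== SOURCE B (Python) =====
-- def manacher_odd(s: str) -> list[int]:
--     n = len(s)
--     p = []
--     for i in range(n):
--         r = 0
--         while i - r - 1 >= 0 and i + r + 1 < n and s[i - r - 1] == s[i + r + 1]:
--             r = r + 1
--         p.append(r)
--     return p
-- ===== Notes on version B (the rewrite author's own statement) =====
-- stated objective: simpler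
-- what changed: Replaced Manacher's center/right/mirror bookkeeping with independent naive expand-around-center at each index, which returns the same radius array.
import Mathlib
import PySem

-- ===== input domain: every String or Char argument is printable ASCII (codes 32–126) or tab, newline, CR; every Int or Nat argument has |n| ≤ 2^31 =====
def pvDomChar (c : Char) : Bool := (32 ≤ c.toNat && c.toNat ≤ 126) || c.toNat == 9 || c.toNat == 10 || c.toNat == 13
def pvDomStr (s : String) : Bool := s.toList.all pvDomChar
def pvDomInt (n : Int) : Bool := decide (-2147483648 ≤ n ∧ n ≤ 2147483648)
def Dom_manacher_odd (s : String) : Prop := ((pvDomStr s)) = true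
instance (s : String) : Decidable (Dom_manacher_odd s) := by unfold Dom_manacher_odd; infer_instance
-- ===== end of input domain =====

-- B replaces Manacher's center/right/mirror bookkeeping by independent naive
-- expand-around-center at each index; same radii, simpler code (not faster).

-- ===== PORT A =====
-- s[i] for an index both programs only use with 0 ≤ i < len(s): exact there
def pvGetC (cs : List Char) (i : Int) : Char := cs.getD i.toNat ' '
-- p[i] read, index always 0 ≤ i < len(p) at call sites: exact there
def pvGetI (p : List Int) (i : Int) : Int := p.getD i.toNat 0
-- p[i] = v, index always 0 ≤ i < len(p) at call sites: exact there
def pvSet (p : List Int) (i : Int) (v : Int) : List Int := p.set i.toNat v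

-- while i < n: p.append(0); i = i + 1
def pvMakeP (p : List Int) (i n : Int) : List Int :=
  if h : i < n then pvMakeP (p ++ [0]) (i + 1) n else p
termination_by (n - i).toNat
decreasing_by omega

-- inner while loop of A; p[i] is threaded as pi
def pvInnerA (cs : List Char) (n : Int) (pi lo hi : Int) : Int :=
  if h : 0 ≤ lo ∧ hi < n ∧ pvGetC cs lo = pvGetC cs hi then
    pvInnerA cs n (pi + 1) (lo - 1) (hi + 1)
  else pi
termination_by (n - hi).toNat
decreasing_by omega

-- outer while loop of A over i, with state (p, center, right)
def pvOuterA (cs : List Char) (n : Int) (p : List Int) (center right i : Int) : List Int :=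
  if h : i < n then
    let mirror := 2 * center - i
    let p1 := if i < right ∧ 0 ≤ mirror then
        let diff := right - i
        let pm := pvGetI p mirror
        pvSet p i (if pm < diff then pm else diff)
      else p
    let pi0 := pvGetI p1 i
    let piF := pvInnerA cs n pi0 (i - pi0 - 1) (i + pi0 + 1)
    let p2 := pvSet p1 i piF
    if i + piF > right then pvOuterA cs n p2 i (i + piF) (i + 1)
    else pvOuterA cs n p2 center right (i + 1)
  else p
termination_by (n - i).toNat
decreasing_by omega; omega

def manacher_odd (s : String) : List Int :=
  let n : Int := PySem.Str.len s
  let p := pvMakeP [] 0 n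
  if n = 0 then p
  else pvOuterA s.toList n (pvSet p 0 0) 0 0 1

-- ===== PORT B =====
-- the naive expansion loop of B: r counts matching pairs around i
def pvExpandB (cs : List Char) (n i r : Int) : Int :=
  if h : 0 ≤ i - r - 1 ∧ i + r + 1 < n ∧ pvGetC cs (i - r - 1) = pvGetC cs (i + r + 1) then
    pvExpandB cs n i (r + 1)
  else r
termination_by (n - (i + r + 1)).toNat
decreasing_by omega

def manacher_odd_alt (s : String) : List Int :=
  (PySem.List.pyRange 0 (PySem.Str.len s) 1).map
    (fun i => pvExpandB s.toList (PySem.Str.len s) i 0)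

-- ===== PRECONDITION & SPEC =====
def Spec_manacher_odd (s : String) (out : List Int) : Prop := out = manacher_odd_alt s
instance (s : String) (out : List Int) : Decidable (Spec_manacher_odd s out) := by unfold Spec_manacher_odd; infer_instance

-- ===== CLAIM (what is proved, stated in full; the proofs are below) =====
def Claim_equal_manacher_odd : Prop := ∀ (s : String), Dom_manacher_odd s → Spec_manacher_odd s (manacher_odd s)

-- ===== LEMMAS AND PROOFS =====

-- k matching pairs around center i, all indices in range
def pvPal (cs : List Char) (n i k : Int) : Prop :=
  0 ≤ k ∧ k ≤ i ∧ i + k < n ∧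
  ∀ j : Int, 1 ≤ j → j ≤ k → pvGetC cs (i - j) = pvGetC cs (i + j)

-- the (k+1)-st pair around i also matches
def pvExt (cs : List Char) (n i k : Int) : Prop :=
  0 ≤ i - k - 1 ∧ i + k + 1 < n ∧ pvGetC cs (i - k - 1) = pvGetC cs (i + k + 1)

lemma pvPal_succ {cs : List Char} {n i k : Int}
    (hp : pvPal cs n i k) (he : pvExt cs n i k) : pvPal cs n i (k + 1) := by
  obtain ⟨hk0, hki, hkn, hj⟩ := hp
  obtain ⟨he1, he2, he3⟩ := he
  refine ⟨by omega, by omega, by omega, ?_⟩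
  intro j h1 h2
  rcases eq_or_lt_of_le h2 with h | h
  · subst h
    have e1 : i - (k + 1) = i - k - 1 := by ring
    have e2 : i + (k + 1) = i + k + 1 := by ring
    rw [e1, e2]; exact he3
  · exact hj j h1 (by omega)

lemma pvExpandB_spec (cs : List Char) (n i : Int) :
    ∀ r, pvPal cs n i r →
      pvPal cs n i (pvExpandB cs n i r) ∧ ¬ pvExt cs n i (pvExpandB cs n i r) := by
  intro r hr
  induction r using pvExpandB.induct cs n i with
  | case1 r h ih =>
      rw [pvExpandB, dif_pos h]
      exact ih (pvPal_succ hr h)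
  | case2 r h =>
      rw [pvExpandB, dif_neg h]
      exact ⟨hr, h⟩

lemma pvInnerA_eq_pvExpandB (cs : List Char) (n i : Int) :
    ∀ r, pvInnerA cs n r (i - r - 1) (i + r + 1) = pvExpandB cs n i r := by
  intro r
  induction r using pvExpandB.induct cs n i with
  | case1 r h ih =>
      rw [pvInnerA, dif_pos h, pvExpandB, dif_pos h]
      have e1 : i - r - 1 - 1 = i - (r + 1) - 1 := by ring
      have e2 : i + r + 1 + 1 = i + (r + 1) + 1 := by ring
      rw [e1, e2]; exact ih
  | case2 r h =>
      rw [pvInnerA, dif_neg h, pvExpandB, dif_neg h]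

lemma pvPal_unique {cs : List Char} {n i a b : Int}
    (ha : pvPal cs n i a) (hae : ¬ pvExt cs n i a)
    (hb : pvPal cs n i b) (hbe : ¬ pvExt cs n i b) : a = b := by
  obtain ⟨ha0, hai, han, haj⟩ := ha
  obtain ⟨hb0, hbi, hbn, hbj⟩ := hb
  by_contra hne
  rcases lt_trichotomy a b with h | h | h
  · apply hae
    have hx := hbj (a + 1) (by omega) (by omega)
    have e1 : i - (a + 1) = i - a - 1 := by ring
    have e2 : i + (a + 1) = i + a + 1 := by ring
    rw [e1, e2] at hx
    exact ⟨by omega, by omega, hx⟩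
  · exact hne h
  · apply hbe
    have hx := haj (b + 1) (by omega) (by omega)
    have e1 : i - (b + 1) = i - b - 1 := by ring
    have e2 : i + (b + 1) = i + b + 1 := by ring
    rw [e1, e2] at hx
    exact ⟨by omega, by omega, hx⟩

-- the seed taken from the mirror index is a valid pair count around i
lemma pvSeedPal (cs : List Char) (n c i R M : Int)
    (hci : c < i) (_hm0 : 0 ≤ 2 * c - i)
    (hR : pvPal cs n c R) (hM : pvPal cs n (2 * c - i) M)
    (hir : i < c + R) :
    pvPal cs n i (min M (c + R - i)) := by
  obtain ⟨hR0, hRc, hRn, hRj⟩ := hR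
  obtain ⟨hM0, hMc, hMn, hMj⟩ := hM
  refine ⟨by omega, by omega, by omega, ?_⟩
  intro j h1 h2
  have hjM : j ≤ M := by omega
  have hjR : j ≤ c + R - i := by omega
  -- step 1: reflect i+j through c
  have s1 := hRj (i + j - c) (by omega) (by omega)
  have e1 : c - (i + j - c) = 2 * c - i - j := by ring
  have e2 : c + (i + j - c) = i + j := by ring
  rw [e1, e2] at s1
  -- step 2: the pair around the mirror
  have s2 := hMj j h1 hjM
  have e3 : 2 * c - i - j = 2 * c - i - j := rfl
  -- step 3: reflect 2c-i+j through c back to i-j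
  have s3 : pvGetC cs (2 * c - i + j) = pvGetC cs (i - j) := by
    rcases lt_trichotomy (i - c - j) 0 with he | he | he
    · have t := hRj (c + j - i) (by omega) (by omega)
      have f1 : c - (c + j - i) = i - j := by ring
      have f2 : c + (c + j - i) = 2 * c - i + j := by ring
      rw [f1, f2] at t
      exact t.symm
    · have f1 : 2 * c - i + j = c := by omega
      have f2 : i - j = c := by omega
      rw [f1, f2]
    · have t := hRj (i - c - j) (by omega) (by omega)
      have f1 : c - (i - c - j) = 2 * c - i + j := by ring
      have f2 : c + (i - c - j) = i - j := by ring
      rw [f1, f2] at t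
      exact t
  calc pvGetC cs (i - j) = pvGetC cs (2 * c - i + j) := s3.symm
    _ = pvGetC cs (2 * c - i - j) := s2.symm
    _ = pvGetC cs (i + j) := s1

-- B's radius at index i
def pvRad (cs : List Char) (n i : Int) : Int := pvExpandB cs n i 0

lemma pvRad_spec (cs : List Char) (n i : Int) (h0 : 0 ≤ i) (h1 : i < n) :
    pvPal cs n i (pvRad cs n i) ∧ ¬ pvExt cs n i (pvRad cs n i) :=
  pvExpandB_spec cs n i 0 ⟨by omega, by omega, by omega, fun j hj1 hj2 => by omega⟩

-- the state A's seeding computes, factored out of the outer loop for the proof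
def pvSeedP (p : List Int) (center right i : Int) : List Int :=
  if i < right ∧ 0 ≤ 2 * center - i then
    pvSet p i (if pvGetI p (2 * center - i) < right - i then pvGetI p (2 * center - i)
               else right - i)
  else p

-- restated step equation of pvOuterA through pvSeedP (definitional)
lemma pvOuterA_step (cs : List Char) (n : Int) (p : List Int) (c r i : Int) (hi : i < n) :
    pvOuterA cs n p c r i =
      (let p1 := pvSeedP p c r i
       let pi0 := pvGetI p1 i
       let piF := pvInnerA cs n pi0 (i - pi0 - 1) (i + pi0 + 1)
       let p2 := pvSet p1 i piF
       if i + piF > r then pvOuterA cs n p2 i (i + piF) (i + 1)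
       else pvOuterA cs n p2 c r (i + 1)) := by
  rw [pvOuterA, dif_pos hi]; rfl

lemma pvSeedP_length (p : List Int) (c r i : Int) :
    (pvSeedP p c r i).length = p.length := by
  unfold pvSeedP pvSet; split_ifs <;> simp

lemma pvSeedP_getElem_ne {p : List Int} {c r i : Int} {j : Nat}
    (hj : j < p.length) (hne : j ≠ i.toNat) :
    (pvSeedP p c r i)[j]'(by rw [pvSeedP_length]; exact hj) = p[j] := by
  unfold pvSeedP pvSet
  split_ifs with h h2
  · exact List.getElem_set_ne (fun he => hne he.symm) _
  · exact List.getElem_set_ne (fun he => hne he.symm) _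
  · rfl

def pvInv (cs : List Char) (n : Int) (p : List Int) (c r i : Int) : Prop :=
  n = (cs.length : Int) ∧ (p.length : Int) = n ∧ 1 ≤ i ∧ 0 ≤ c ∧ c < i ∧
  r = c + pvRad cs n c ∧
  ∀ j : Nat, (hj : j < p.length) → p[j] = (if (j : Int) < i then pvRad cs n (j : Int) else 0)

lemma pvGetI_inv {cs : List Char} {n : Int} {p : List Int} {c r i : Int}
    (hinv : pvInv cs n p c r i) (k : Int) (h0 : 0 ≤ k) (h1 : k < n) :
    pvGetI p k = if k < i then pvRad cs n k else 0 := by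
  obtain ⟨hn, hlen, _, _, _, _, hp⟩ := hinv
  have hk : k.toNat < p.length := by omega
  unfold pvGetI
  rw [List.getD_eq_getElem _ _ hk, hp k.toNat hk]
  rw [Int.toNat_of_nonneg h0]

lemma pvGetI_set_self {p : List Int} {i v : Int} (h0 : 0 ≤ i) (h1 : i < (p.length : Int)) :
    pvGetI (pvSet p i v) i = v := by
  unfold pvGetI pvSet
  rw [List.getD_eq_getElem _ _ (by simp; omega), List.getElem_set_self]

-- the seed A starts its expansion from is a valid pair count around i
lemma pvSeed_pal {cs : List Char} {n : Int} {p : List Int} {c r i : Int}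
    (hinv : pvInv cs n p c r i) (hi : i < n) :
    pvPal cs n i (pvGetI (pvSeedP p c r i) i) := by
  have hinv' := hinv
  obtain ⟨hn, hlen, h1i, hc0, hci, hr, hp⟩ := hinv'
  unfold pvSeedP
  by_cases hb : i < r ∧ 0 ≤ 2 * c - i
  · rw [if_pos hb]
    have hpm : pvGetI p (2 * c - i) = pvRad cs n (2 * c - i) := by
      rw [pvGetI_inv hinv (2 * c - i) hb.2 (by omega), if_pos (by omega)]
    rw [hpm, pvGetI_set_self (by omega) (by omega)]
    have hM := (pvRad_spec cs n (2 * c - i) hb.2 (by omega)).1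
    have hR := (pvRad_spec cs n c hc0 (by omega)).1
    have hmin : (if pvRad cs n (2 * c - i) < r - i then pvRad cs n (2 * c - i) else r - i) =
        min (pvRad cs n (2 * c - i)) (c + pvRad cs n c - i) := by
      subst hr; split_ifs <;> omega
    rw [hmin]
    exact pvSeedPal cs n c i (pvRad cs n c) (pvRad cs n (2 * c - i))
      hci hb.2 hR hM (by omega)
  · rw [if_neg hb]
    have h0 : pvGetI p i = 0 := by
      rw [pvGetI_inv hinv i (by omega) hi, if_neg (by omega)]
    rw [h0]
    exact ⟨by omega, by omega, by omega, fun j hj1 hj2 => by omega⟩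

lemma pvInv_step {cs : List Char} {n : Int} {p : List Int} {c r i : Int} (c' r' : Int)
    (hinv : pvInv cs n p c r i) (hi : i < n)
    (hcr : (c' = i ∧ r' = i + pvRad cs n i) ∨ (c' = c ∧ r' = r)) :
    pvInv cs n (pvSet (pvSeedP p c r i) i (pvRad cs n i)) c' r' (i + 1) := by
  have hinv' := hinv
  obtain ⟨hn, hlen, h1i, hc0, hci, hr, hp⟩ := hinv'
  have hlenS : (pvSeedP p c r i).length = p.length := pvSeedP_length p c r i
  have hlen2 : ((pvSet (pvSeedP p c r i) i (pvRad cs n i)).length : Int) = n := by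
    unfold pvSet; rw [List.length_set, hlenS]; exact hlen
  refine ⟨hn, hlen2, by omega, ?_, ?_, ?_, ?_⟩
  · rcases hcr with ⟨hc', _⟩ | ⟨hc', _⟩ <;> omega
  · rcases hcr with ⟨hc', _⟩ | ⟨hc', _⟩ <;> omega
  · rcases hcr with ⟨hc', hr'⟩ | ⟨hc', hr'⟩ <;> subst hc' <;> subst hr'
    · rfl
    · exact hr
  · intro j hj
    have hjp : j < p.length := by
      rw [show (pvSet (pvSeedP p c r i) i (pvRad cs n i)).length = p.length from by
        unfold pvSet; rw [List.length_set, hlenS]] at hj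
      exact hj
    by_cases hji : j = i.toNat
    · subst hji
      have hcast : ((i.toNat : Nat) : Int) = i := Int.toNat_of_nonneg (by omega)
      unfold pvSet
      rw [List.getElem_set_self, if_pos (show ((i.toNat : Nat) : Int) < i + 1 by omega), hcast]
    · have : (pvSet (pvSeedP p c r i) i (pvRad cs n i))[j]'hj = p[j]'hjp := by
        unfold pvSet
        rw [List.getElem_set_ne (fun he => hji he.symm)]
        exact pvSeedP_getElem_ne hjp hji
      rw [this, hp j hjp]
      have hjine : (j : Int) ≠ i := by omega
      have hiff : ((j : Int) < i + 1) ↔ ((j : Int) < i) := by omega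
      simp only [hiff]

-- p already holds every radius once i has reached n
lemma pvDone {cs : List Char} {n : Int} {p : List Int} {c r i : Int}
    (hinv : pvInv cs n p c r i) (hni : n ≤ i) :
    p = (PySem.List.pyRange 0 n 1).map (fun j => pvExpandB cs n j 0) := by
  obtain ⟨hn, hlen, _, _, _, _, hp⟩ := hinv
  apply List.ext_getElem
  · simp [PySem.List.length_pyRange_one]; omega
  · intro j h1 h2
    rw [hp j h1, List.getElem_map, PySem.List.getElem_pyRange_one, if_pos (by omega)]
    simp [pvRad]

lemma pvOuterA_eq (cs : List Char) (n : Int) :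
    ∀ (fuel : Nat) (p : List Int) (c r i : Int), (n - i).toNat ≤ fuel →
      pvInv cs n p c r i →
      pvOuterA cs n p c r i = (PySem.List.pyRange 0 n 1).map (fun j => pvExpandB cs n j 0) := by
  intro fuel
  induction fuel with
  | zero =>
      intro p c r i hf hinv
      have hni : n ≤ i := by omega
      rw [pvOuterA, dif_neg (by omega)]
      exact pvDone hinv hni
  | succ f ih =>
      intro p c r i hf hinv
      by_cases hi : i < n
      · have hinv' := hinv
        obtain ⟨hn, hlen, h1i, hc0, hci, hr, hp⟩ := hinv'
        rw [pvOuterA_step cs n p c r i hi]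
        simp only
        rw [pvInnerA_eq_pvExpandB cs n i (pvGetI (pvSeedP p c r i) i)]
        have hpal := pvSeed_pal hinv hi
        have hres := pvExpandB_spec cs n i (pvGetI (pvSeedP p c r i) i) hpal
        have hradS := pvRad_spec cs n i (by omega) hi
        have hrad : pvExpandB cs n i (pvGetI (pvSeedP p c r i) i) = pvRad cs n i :=
          pvPal_unique hres.1 hres.2 hradS.1 hradS.2
        rw [hrad]
        split_ifs with hgt
        · exact ih _ _ _ _ (by omega) (pvInv_step i (i + pvRad cs n i) hinv hi (Or.inl ⟨rfl, rfl⟩))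
        · exact ih _ _ _ _ (by omega) (pvInv_step c r hinv hi (Or.inr ⟨rfl, rfl⟩))
      · rw [pvOuterA, dif_neg hi]
        exact pvDone hinv (by omega)

lemma pvMakeP_eq : ∀ (p : List Int) (i n : Int),
    pvMakeP p i n = p ++ List.replicate (n - i).toNat 0 := by
  intro p i n
  induction p, i using pvMakeP.induct n with
  | case1 p i h ih =>
      rw [pvMakeP, dif_pos h, ih]
      have he : (n - i).toNat = (n - (i + 1)).toNat + 1 := by omega
      rw [he, List.replicate_succ]
      simp
  | case2 p i h =>
      rw [pvMakeP, dif_neg h]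
      have he : (n - i).toNat = 0 := by omega
      simp [he]

lemma pvRad_zero (cs : List Char) (n : Int) : pvRad cs n 0 = 0 := by
  unfold pvRad
  rw [pvExpandB, dif_neg (by rintro ⟨h1, -, -⟩; omega)]

-- the initial state (all-zero p with p[0] = 0, center = right = 0) satisfies the invariant
lemma pvInit_inv (cs : List Char) :
    pvInv cs (cs.length : Int) (pvSet (List.replicate cs.length 0) 0 0) 0 0 1 := by
  unfold pvSet
  rw [show ((0:Int).toNat) = 0 from rfl, List.set_replicate_self]
  refine ⟨rfl, by simp, by omega, by omega, by omega, by simp [pvRad_zero], ?_⟩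
  intro j hj
  rw [List.getElem_replicate]
  by_cases hj0 : j = 0
  · subst hj0
    simp [pvRad_zero]
  · rw [if_neg (by omega)]

-- ===== VERDICT (by name: the statement is the Claim_ definition above) =====
theorem manacher_odd_spec : Claim_equal_manacher_odd := by
  intro s _
  unfold Spec_manacher_odd manacher_odd manacher_odd_alt
  simp only [PySem.Str.len_eq]
  by_cases h0 : (s.toList.length : Int) = 0
  · rw [if_pos h0, pvMakeP_eq, h0]
    simp [PySem.List.pyRange_one_eq_nil]
  · rw [if_neg h0]
    have hP : pvMakeP [] 0 (s.toList.length : Int) = List.replicate s.toList.length 0 := by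
      rw [pvMakeP_eq]; simp
    rw [hP]
    exact pvOuterA_eq s.toList _ s.toList.length _ 0 0 1 (by omega) (pvInit_inv s.toList)
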